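-- pv_equiv track=rewrite | github.com/secureinfo42/investigator | loader.py | long2ip_rev
-- ===== SOURCE A (Python) =====
-- def long2ip_rev(long):
--   long = int(long)
--   ip = [0,0,0,0]
--   ip[3] = (long & 0xFF000000) >> 24
--   ip[2] = (long & 0x00FF0000) >> 16
--   ip[1] = (long & 0x0000FF00) >> 8
--   ip[0] = (long & 0x000000FF)
--   ip = [str(x) for x in ip]
--   ip = '.'.join(ip)
--   return(ip)
-- ===== SOURCE B (Python) =====
-- def long2ip_rev(long):
--     def go(n, k):
--         q, r = divmod(n, 256)
--         return str(r) if k == 1 else str(r) + '.' + go(q, k - 1)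
--     return go(int(long) % 0x100000000, 4)
-- ===== Notes on version B (the rewrite author's own statement) =====
-- stated objective: alternative
-- what changed: B replaces A's four independent mask-and-shift extractions into a preallocated list followed by map and join with a recursive single pass: it reduces the value modulo 2^32 once, then peels one byte per step with divmod(n, 256), building the dotted string directly in the recursion instead of materialising a list.
import Mathlib
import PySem

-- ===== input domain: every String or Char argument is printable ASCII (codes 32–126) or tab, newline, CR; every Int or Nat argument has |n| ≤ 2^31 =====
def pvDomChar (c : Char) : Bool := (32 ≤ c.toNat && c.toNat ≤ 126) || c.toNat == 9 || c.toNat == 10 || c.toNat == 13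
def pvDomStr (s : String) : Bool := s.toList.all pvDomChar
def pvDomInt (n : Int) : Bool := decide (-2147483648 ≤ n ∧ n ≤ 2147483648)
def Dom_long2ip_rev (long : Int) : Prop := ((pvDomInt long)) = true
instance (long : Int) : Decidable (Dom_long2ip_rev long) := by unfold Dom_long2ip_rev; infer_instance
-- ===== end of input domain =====

-- B replaces A's four mask-and-shift extractions + list + join with a recursive single pass:
-- reduce mod 2^32 once, then peel one byte per step with divmod(n,256), building the dotted
-- string directly in the recursion (objective: alternative; same O(1) cost).


-- ===== PORT A =====
def long2ip_rev (long : Int) : String :=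
  -- long = int(long) is the identity on an Int argument
  let ip : List Int := [0, 0, 0, 0]
  let ip := ip.set 3 ((PySem.Int.band long 0xFF000000) >>> (24 : Nat))
  let ip := ip.set 2 ((PySem.Int.band long 0x00FF0000) >>> (16 : Nat))
  let ip := ip.set 1 ((PySem.Int.band long 0x0000FF00) >>> (8 : Nat))
  let ip := ip.set 0 (PySem.Int.band long 0x000000FF)
  let ipS := ip.map PySem.Int.toStr
  PySem.Str.join "." ipS

-- ===== PORT B =====
-- inner helper go(n, k): q, r = divmod(n, 256); str(r) if k == 1 else str(r) + '.' + go(q, k-1)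
def long2ip_rev_go (n : Int) : Nat → String
  | 0 => ""            -- unreachable: go is only called with k ≥ 1
  | 1 => PySem.Int.toStr (PySem.Int.mod n 256)
  | (k' + 2) =>
      PySem.Int.toStr (PySem.Int.mod n 256) ++ "." ++
        long2ip_rev_go (PySem.Int.floordiv n 256) (k' + 1)

def long2ip_rev_alt (long : Int) : String :=
  long2ip_rev_go (PySem.Int.mod long 0x100000000) 4

-- ===== PRECONDITION & SPEC =====
def Spec_long2ip_rev (long : Int) (out : String) : Prop := out = long2ip_rev_alt long
instance (long : Int) (out : String) : Decidable (Spec_long2ip_rev long out) := by unfold Spec_long2ip_rev; infer_instance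

-- ===== CLAIM (what is proved, stated in full; the proofs are below) =====
def Claim_equal_long2ip_rev : Prop := ∀ (long : Int), Dom_long2ip_rev long → Spec_long2ip_rev long (long2ip_rev long)

-- ===== LEMMAS AND PROOFS =====

-- a byte mask commutes with shifts: t &&& (255·2^k) keeps byte k in place
lemma maskNat (t k : Nat) : t &&& (255 <<< k) = ((t >>> k) &&& 255) <<< k := by
  apply Nat.eq_of_testBit_eq
  intro i
  simp [Nat.testBit_and, Nat.testBit_shiftLeft, Nat.testBit_shiftRight]
  by_cases h : k ≤ i
  · simp [h]
  · simp [h]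

lemma maskDiv (t k : Nat) : t &&& (255 * 2 ^ k) = t / 2 ^ k % 256 * 2 ^ k := by
  have h := maskNat t k
  have h255 : ∀ x : Nat, x &&& 255 = x % 256 := fun x => Nat.and_two_pow_sub_one_eq_mod x 8
  simpa [Nat.shiftLeft_eq, Nat.shiftRight_eq_div_pow, h255] using h

lemma mask32 (t : Nat) : t &&& 4294967295 = t % 4294967296 :=
  Nat.and_two_pow_sub_one_eq_mod t 32

lemma castShift (m k : Nat) : ((m : Int) >>> k) = ((m >>> k : Nat) : Int) :=
  Int.mem_toNat?.mp rfl

-- the negative branch of Python's & with a nonnegative mask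
lemma band_neg_mask (long : Int) (hneg : ¬ 0 ≤ long) (m : Nat) :
    PySem.Int.band long (m : Int) = ((m - (m &&& (-long - 1).toNat) : Nat) : Int) := by
  rw [PySem.Int.band.eq_1, if_neg hneg, if_pos (by positivity)]
  simp

lemma tBound (long : Int) (h : -2147483648 ≤ long) : (-long - 1).toNat ≤ 2147483647 := by
  omega

-- byte k of A equals byte k of the masked word, for k = 0,8,16,24
lemma byteEq (long : Int) (h : -2147483648 ≤ long) (k : Nat)
    (hk : k = 0 ∨ k = 8 ∨ k = 16 ∨ k = 24) :
    (PySem.Int.band long ((255 * 2 ^ k : Nat) : Int)) >>> k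
      = (((PySem.Int.band long 4294967295).toNat / 2 ^ k % 256 : Nat) : Int) := by
  by_cases hpos : 0 ≤ long
  · rw [PySem.Int.band_of_nonneg hpos (by positivity),
        PySem.Int.band_of_nonneg hpos (by norm_num), castShift]
    simp only [Int.toNat_natCast, show ((4294967295 : Int)).toNat = 4294967295 from rfl]
    rw [maskDiv, mask32, Nat.shiftRight_eq_div_pow]
    congr 1
    rcases hk with rfl | rfl | rfl | rfl <;> omega
  · rw [band_neg_mask long hpos, show (4294967295 : Int) = ((4294967295 : Nat) : Int) from rfl,
        band_neg_mask long hpos, castShift]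
    have ht := tBound long h
    set t := (-long - 1).toNat with hteq
    have h1 : (255 * 2 ^ k) &&& t = t / 2 ^ k % 256 * 2 ^ k := by
      rw [Nat.and_comm]; exact maskDiv t k
    have h2 : (4294967295 : Nat) &&& t = t % 4294967296 := by
      rw [Nat.and_comm]; exact mask32 t
    rw [h1, h2, Nat.shiftRight_eq_div_pow]
    simp only [Int.toNat_natCast]
    congr 1
    rcases hk with rfl | rfl | rfl | rfl <;> omega

-- Python's long % 2^32 equals the low 32-bit mask A implicitly applies
lemma mod32_eq (long : Int) (h : -2147483648 ≤ long) :
    PySem.Int.mod long 4294967296 = (((PySem.Int.band long 4294967295).toNat : Nat) : Int) := by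
  rw [PySem.Int.mod_eq_emod_of_pos (by norm_num)]
  by_cases hpos : 0 ≤ long
  · rw [PySem.Int.band_of_nonneg hpos (by norm_num)]
    simp only [Int.toNat_natCast, show ((4294967295 : Int)).toNat = 4294967295 from rfl]
    rw [mask32]
    omega
  · rw [show (4294967295 : Int) = ((4294967295 : Nat) : Int) from rfl,
        band_neg_mask long hpos]
    have ht := tBound long h
    set t := (-long - 1).toNat with hteq
    have h2 : (4294967295 : Nat) &&& t = t % 4294967296 := by
      rw [Nat.and_comm]; exact mask32 t
    rw [h2]
    simp only [Int.toNat_natCast]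
    omega

-- ===== VERDICT (by name: the statement is the Claim_ definition above) =====
theorem long2ip_rev_spec : Claim_equal_long2ip_rev := by
  unfold Claim_equal_long2ip_rev
  intro long hdom
  have h : -2147483648 ≤ long := (of_decide_eq_true hdom).1
  have b0 : PySem.Int.band long ((255 * 2 ^ 0 : Nat) : Int)
      = (((PySem.Int.band long 4294967295).toNat / 2 ^ 0 % 256 : Nat) : Int) := by
    have := byteEq long h 0 (by norm_num)
    simpa using this
  unfold Spec_long2ip_rev long2ip_rev long2ip_rev_alt
  simp only [List.set, List.map]
  rw [show (0xFF000000 : Int) = ((255 * 2 ^ 24 : Nat) : Int) by norm_num,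
      show (0x00FF0000 : Int) = ((255 * 2 ^ 16 : Nat) : Int) by norm_num,
      show (0x0000FF00 : Int) = ((255 * 2 ^ 8 : Nat) : Int) by norm_num,
      show (0x000000FF : Int) = ((255 * 2 ^ 0 : Nat) : Int) by norm_num]
  rw [byteEq long h 8 (by norm_num), byteEq long h 16 (by norm_num),
      byteEq long h 24 (by norm_num), b0,
      show (0x100000000 : Int) = (4294967296 : Int) from rfl, mod32_eq long h]
  set m : Nat := (PySem.Int.band long 4294967295).toNat with hm
  have g1 : ((m / 2 ^ 0 % 256 : Nat) : Int) = ((m % 256 : Nat) : Int) := by norm_num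
  have g2 : ((m / 2 ^ 8 % 256 : Nat) : Int) = ((m / 256 % 256 : Nat) : Int) := by norm_num
  have g3 : ((m / 2 ^ 16 % 256 : Nat) : Int) = ((m / 256 / 256 % 256 : Nat) : Int) := by
    rw [Nat.div_div_eq_div_mul]; norm_num
  have g4 : ((m / 2 ^ 24 % 256 : Nat) : Int) = ((m / 256 / 256 / 256 % 256 : Nat) : Int) := by
    rw [Nat.div_div_eq_div_mul, Nat.div_div_eq_div_mul]; norm_num
  rw [g1, g2, g3, g4]
  apply String.toList_injective
  simp only [long2ip_rev_go]
  simp [PySem.Str.join, PySem.Chars.join, List.intercalate]
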